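-- pv_equiv track=rewrite | github.com/Deniz97/pdf-search | app/cli/run_search_eval.py | _sample_rows
-- ===== SOURCE A (Python) =====
-- from collections import defaultdict
--
-- def _sample_rows(
--     rows: list,
--     documents: int | None,
--     questions_per_document: int | None,
--     limit: int | None,
-- ) -> list:
--     """Apply document-based sampling and optional total limit."""
--     if documents is not None or questions_per_document is not None:
--         by_doc: dict[str, list] = defaultdict(list)
--         for row in rows:
--             target_doc_id = str(row[4])  # target_document_id
--             by_doc[target_doc_id].append(row)
--         doc_ids = sorted(by_doc.keys())
--         if documents is not None:
--             doc_ids = doc_ids[:documents]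
--         sampled = []
--         for doc_id in doc_ids:
--             doc_rows = by_doc[doc_id]
--             if questions_per_document is not None:
--                 doc_rows = doc_rows[:questions_per_document]
--             sampled.extend(doc_rows)
--         rows = sampled
--     if limit is not None:
--         rows = rows[:limit]
--     return rows
-- ===== SOURCE B (Python) =====
-- def _sample_rows(
--     rows: list,
--     documents: int | None,
--     questions_per_document: int | None,
--     limit: int | None,
-- ) -> list:
--     """Apply document-based sampling and optional total limit."""
--     if documents is not None or questions_per_document is not None:
--         doc_ids = sorted({str(r[4]) for r in rows})
--         if documents is not None:
--             doc_ids = doc_ids[:documents]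
--
--         def take(doc_id):
--             grp = [r for r in rows if str(r[4]) == doc_id]
--             if questions_per_document is not None:
--                 grp = grp[:questions_per_document]
--             return grp
--
--         rows = [r for doc_id in doc_ids for r in take(doc_id)]
--     if limit is not None:
--         rows = rows[:limit]
--     return rows
-- ===== Notes on version B (the rewrite author's own statement) =====
-- stated objective: alternative
-- what changed: Replaces the defaultdict grouping pass with a sorted set of document ids plus a per-id filter scan of the rows (no dict is built); slicing of ids, per-document rows and the final limit is unchanged.
import Mathlib
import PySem

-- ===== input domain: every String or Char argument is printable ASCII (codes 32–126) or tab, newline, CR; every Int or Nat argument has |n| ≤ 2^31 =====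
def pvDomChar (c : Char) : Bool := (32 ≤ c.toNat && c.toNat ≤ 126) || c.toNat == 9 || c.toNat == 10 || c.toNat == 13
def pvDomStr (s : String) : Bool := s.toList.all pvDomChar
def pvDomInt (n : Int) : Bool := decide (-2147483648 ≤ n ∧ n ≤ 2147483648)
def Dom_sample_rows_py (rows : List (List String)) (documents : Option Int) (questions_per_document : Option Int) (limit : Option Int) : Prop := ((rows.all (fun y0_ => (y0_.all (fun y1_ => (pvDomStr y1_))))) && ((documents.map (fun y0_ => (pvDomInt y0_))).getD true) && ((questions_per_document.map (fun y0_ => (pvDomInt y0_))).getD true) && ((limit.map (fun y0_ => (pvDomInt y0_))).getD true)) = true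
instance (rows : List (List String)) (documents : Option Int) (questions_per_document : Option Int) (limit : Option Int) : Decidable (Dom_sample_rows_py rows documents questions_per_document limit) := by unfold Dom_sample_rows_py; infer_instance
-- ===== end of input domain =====

-- B replaces the dict-grouping pass with a sorted set of document ids plus a per-id filter scan (alternative decomposition, no dict; not claimed faster).

-- str(r[4]) (total form; Pre_ keeps rows long enough that Python's r[4] returns); used by both ports
def pvKey (r : List String) : String := PySem.List.pyGetD r (4 : Int) ""

-- ===== PORT A =====
def sample_rows_py (rows : List (List String)) (documents : Option Int) (questions_per_document : Option Int) (limit : Option Int) : List (List String) :=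
  let rows1 :=
    if documents.isSome || questions_per_document.isSome then
      -- by_doc = defaultdict(list); for row in rows: by_doc[target_doc_id].append(row), target_doc_id = str(row[4]) = pvKey row
      let by_doc : PySem.Dict String (List (List String)) :=
        rows.foldl (fun d row => d.modify (pvKey row) [] (fun l => l ++ [row])) PySem.Dict.empty
      let doc_ids := PySem.List.sorted (PySem.Dict.keys by_doc) (fun x => x) false
      let doc_ids :=
        match documents with
        | some n => PySem.List.slice doc_ids none (some n)
        | none => doc_ids
      doc_ids.foldl (fun sampled doc_id =>
        let doc_rows := by_doc.getD doc_id []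
        let doc_rows :=
          match questions_per_document with
          | some q => PySem.List.slice doc_rows none (some q)
          | none => doc_rows
        sampled ++ doc_rows) []
    else rows
  match limit with
  | some l => PySem.List.slice rows1 none (some l)
  | none => rows1

-- ===== PORT B =====
def pvTake (rows : List (List String)) (questions_per_document : Option Int) (doc_id : String) : List (List String) :=
  let grp := rows.filter (fun r => pvKey r == doc_id)
  match questions_per_document with
  | some q => PySem.List.slice grp none (some q)
  | none => grp

def sample_rows_py_alt (rows : List (List String)) (documents : Option Int) (questions_per_document : Option Int) (limit : Option Int) : List (List String) :=
  let rows1 :=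
    if documents.isSome || questions_per_document.isSome then
      let doc_ids := PySem.List.sorted (PySem.Set.ofList (rows.map pvKey)) (fun x => x) false
      let doc_ids :=
        match documents with
        | some n => PySem.List.slice doc_ids none (some n)
        | none => doc_ids
      doc_ids.flatMap (pvTake rows questions_per_document)
    else rows
  match limit with
  | some l => PySem.List.slice rows1 none (some l)
  | none => rows1

-- ===== PRECONDITION & SPEC =====
-- When a sampling option is given, Python evaluates row[4]: Pre_ excludes exactly the rows too short for that (IndexError).
def Pre_sample_rows_py (rows : List (List String)) (documents : Option Int) (questions_per_document : Option Int) (limit : Option Int) : Prop :=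
  (documents.isSome || questions_per_document.isSome) = true → ∀ row ∈ rows, 5 ≤ row.length
instance (rows : List (List String)) (documents : Option Int) (questions_per_document : Option Int) (limit : Option Int) : Decidable (Pre_sample_rows_py rows documents questions_per_document limit) := by unfold Pre_sample_rows_py; infer_instance

def pvWitness_sample_rows_py : List (List String) × Option Int × Option Int × Option Int :=
  ([["q1", "x", "y", "z", "doc2"], ["q2", "x", "y", "z", "doc1"], ["q3", "x", "y", "z", "doc1"]], some 2, some 1, none)

def Spec_sample_rows_py (rows : List (List String)) (documents : Option Int) (questions_per_document : Option Int) (limit : Option Int) (out : List (List String)) : Prop := out = sample_rows_py_alt rows documents questions_per_document limit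
instance (rows : List (List String)) (documents : Option Int) (questions_per_document : Option Int) (limit : Option Int) (out : List (List String)) : Decidable (Spec_sample_rows_py rows documents questions_per_document limit out) := by unfold Spec_sample_rows_py; infer_instance

-- ===== CLAIM (what is proved, stated in full; the proofs are below) =====
def Claim_equal_sample_rows_py : Prop := ∀ (rows : List (List String)) (documents : Option Int) (questions_per_document : Option Int) (limit : Option Int), Dom_sample_rows_py rows documents questions_per_document limit → Pre_sample_rows_py rows documents questions_per_document limit → Spec_sample_rows_py rows documents questions_per_document limit (sample_rows_py rows documents questions_per_document limit)

-- ===== LEMMAS AND PROOFS =====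

-- the grouping dict A builds: its keys are the distinct keys in first-occurrence order …
theorem pv_keys_group (rows : List (List String)) :
    (rows.foldl (fun d row => d.modify (pvKey row) [] (fun l => l ++ [row])) (PySem.Dict.empty : PySem.Dict String (List (List String)))).keys
      = PySem.Set.ofList (rows.map pvKey) := by
  rw [PySem.Dict.keys_foldl_modify_key]
  rfl

-- … and each bucket is the filter of the rows by that key
theorem pv_getD_group (rows : List (List String)) (k : String) :
    (rows.foldl (fun d row => d.modify (pvKey row) [] (fun l => l ++ [row])) (PySem.Dict.empty : PySem.Dict String (List (List String)))).getD k []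
      = rows.filter (fun r => pvKey r == k) := by
  have hmap : rows.foldl (fun d row => d.modify (pvKey row) [] (fun l => l ++ [row])) (PySem.Dict.empty : PySem.Dict String (List (List String)))
      = (rows.map (fun r => (pvKey r, r))).foldl (fun d p => d.modify p.1 [] (fun l => l ++ [p.2])) PySem.Dict.empty := by
    rw [List.foldl_map]
  rw [hmap, PySem.Dict.getD_foldl_modify_append]
  simp [List.filter_map, Function.comp_def]

-- ===== VERDICT (by name: the statement is the Claim_ definition above) =====
theorem sample_rows_py_spec : Claim_equal_sample_rows_py := by
  intro rows documents questions_per_document limit _ _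
  unfold Spec_sample_rows_py sample_rows_py sample_rows_py_alt
  cases hb : documents.isSome || questions_per_document.isSome
  · simp
  · simp only [if_true]
    rw [PySem.List.foldl_append_eq_flatMap]
    simp only [pv_keys_group, pv_getD_group, List.nil_append]
    rfl
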